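-- pv_equiv track=rewrite | github.com/NexSabre/scapy_helper | scapy_helper/main.py | _create_diff_indexes_list
-- ===== SOURCE A (Python) =====
-- def _create_diff_indexes_list(indexes, max_len) -> str:
--     new_list = []
--
--     for idx in range(max_len):
--         if idx not in indexes:
--             new_list.append("..")
--             continue
--
--         if idx < 10:
--             new_list.append(str("^%s" % idx))
--             continue
--         new_list.append(str(idx))
--     else:
--         new_list.append("| position")
--
--     return " ".join(new_list)
-- ===== SOURCE B (Python) =====
-- def _create_diff_indexes_list(indexes, max_len) -> str:
--     new_list = [".."] * max_len
--     for idx in indexes: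
--         if 0 <= idx < max_len:
--             new_list[idx] = "^%s" % idx if idx < 10 else str(idx)
--     new_list.append("| position")
--     return " ".join(new_list)
-- ===== Notes on version B (the rewrite author's own statement) =====
-- stated objective: faster
-- what changed: Instead of scanning every position in range(max_len) with an 'idx in indexes' membership test (quadratic), B allocates the all-'..' list once and scatters annotations by iterating over indexes, overwriting only in-range positions.
import Mathlib
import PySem

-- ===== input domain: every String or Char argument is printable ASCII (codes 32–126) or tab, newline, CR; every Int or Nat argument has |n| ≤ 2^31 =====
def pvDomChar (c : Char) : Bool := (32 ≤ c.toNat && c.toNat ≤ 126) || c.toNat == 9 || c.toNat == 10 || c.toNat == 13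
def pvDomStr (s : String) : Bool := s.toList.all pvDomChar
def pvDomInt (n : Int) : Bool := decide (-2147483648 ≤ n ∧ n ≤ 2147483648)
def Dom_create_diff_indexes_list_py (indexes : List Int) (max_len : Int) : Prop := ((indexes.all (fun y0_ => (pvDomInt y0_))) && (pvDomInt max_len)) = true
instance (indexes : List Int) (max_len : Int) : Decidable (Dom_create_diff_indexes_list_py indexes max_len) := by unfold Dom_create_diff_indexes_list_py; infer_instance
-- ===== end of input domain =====

-- B replaces A's per-position membership scan with a single scatter pass over `indexes`
-- into a preallocated '..' list (asymptotically faster); return value proved equal.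


-- ===== PORT A =====
def create_diff_indexes_list_py (indexes : List Int) (max_len : Int) : String :=
  let new_list : List String :=
    (PySem.List.pyRange 0 max_len 1).foldl (fun acc idx =>
      if ¬ indexes.contains idx then acc ++ [".."]
      else if idx < 10 then acc ++ ["^" ++ PySem.Int.toStr idx]
      else acc ++ [PySem.Int.toStr idx]) []
  let new_list := new_list ++ ["| position"]
  PySem.Str.join " " new_list

-- ===== PORT B =====
def create_diff_indexes_list_py_alt (indexes : List Int) (max_len : Int) : String :=
  let init : List String := List.replicate max_len.toNat ".."
  let new_list : List String :=
    indexes.foldl (fun acc idx =>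
      if 0 ≤ idx ∧ idx < max_len then
        acc.set idx.toNat (if idx < 10 then "^" ++ PySem.Int.toStr idx else PySem.Int.toStr idx)
      else acc) init
  PySem.Str.join " " (new_list ++ ["| position"])

-- ===== PRECONDITION & SPEC =====
def Spec_create_diff_indexes_list_py (indexes : List Int) (max_len : Int) (out : String) : Prop := out = create_diff_indexes_list_py_alt indexes max_len
instance (indexes : List Int) (max_len : Int) (out : String) : Decidable (Spec_create_diff_indexes_list_py indexes max_len out) := by unfold Spec_create_diff_indexes_list_py; infer_instance

-- ===== CLAIM (what is proved, stated in full; the proofs are below) =====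
def Claim_equal_create_diff_indexes_list_py : Prop := ∀ (indexes : List Int) (max_len : Int), Dom_create_diff_indexes_list_py indexes max_len → Spec_create_diff_indexes_list_py indexes max_len (create_diff_indexes_list_py indexes max_len)

-- ===== LEMMAS AND PROOFS =====

-- the annotation written at position idx (same expression in both ports)
def pvAnn (idx : Int) : String :=
  if idx < 10 then "^" ++ PySem.Int.toStr idx else PySem.Int.toStr idx

-- B's scatter step
def pvStep (max_len : Int) (acc : List String) (idx : Int) : List String :=
  if 0 ≤ idx ∧ idx < max_len then acc.set idx.toNat (pvAnn idx) else acc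

lemma pvStep_length (max_len : Int) (acc : List String) (idx : Int) :
    (pvStep max_len acc idx).length = acc.length := by
  unfold pvStep; split_ifs <;> simp

lemma pvFold_length (max_len : Int) (l : List Int) (acc : List String) :
    (l.foldl (pvStep max_len) acc).length = acc.length := by
  induction l generalizing acc with
  | nil => rfl
  | cons x xs ih => simp [List.foldl_cons, ih, pvStep_length]

-- element-wise characterisation of B's scatter fold
lemma pvFold_getElem? (max_len : Int) (l : List Int) (acc : List String)
    (i : Nat) (hi : i < acc.length) (hm : (i : Int) < max_len) :
    (l.foldl (pvStep max_len) acc)[i]?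
      = some (if (i : Int) ∈ l then pvAnn i else acc[i]) := by
  induction l generalizing acc with
  | nil => simp [hi]
  | cons x xs ih =>
    have hlen : (pvStep max_len acc x).length = acc.length := pvStep_length _ _ _
    rw [List.foldl_cons, ih (pvStep max_len acc x) (by omega)]
    by_cases hx : (i : Int) ∈ xs
    · simp [hx]
    · by_cases hxe : x = (i : Int)
      · subst hxe
        have : pvStep max_len acc (i : Int) = acc.set i (pvAnn i) := by
          unfold pvStep
          rw [if_pos ⟨Int.natCast_nonneg i, hm⟩]
          simp
        simp [hx, this, List.getElem_set_self]
      · have : (pvStep max_len acc x)[i]'(by omega) = acc[i] := by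
          unfold pvStep
          split_ifs with h
          · have hne : x.toNat ≠ i := by omega
            exact List.getElem_set_ne hne _
          · rfl
        simp only [this, List.mem_cons, hx, or_false]
        rw [if_neg (fun h : (i : Int) = x => hxe h.symm)]
        simp

-- A's loop body builds exactly the map of a per-position formula
lemma pvA_list (indexes : List Int) (max_len : Int) :
    ((PySem.List.pyRange 0 max_len 1).foldl (fun acc idx =>
      if ¬ indexes.contains idx then acc ++ [".."]
      else if idx < 10 then acc ++ ["^" ++ PySem.Int.toStr idx]
      else acc ++ [PySem.Int.toStr idx]) ([] : List String))
    = (PySem.List.pyRange 0 max_len 1).map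
        (fun idx => if indexes.contains idx then pvAnn idx else "..") := by
  induction (PySem.List.pyRange 0 max_len 1) using List.reverseRecOn with
  | nil => rfl
  | append_singleton xs x ih =>
    rw [List.foldl_append, List.map_append, ih]
    simp only [List.foldl_cons, List.foldl_nil, List.map_cons, List.map_nil, pvAnn]
    split_ifs with h1 h2 <;> simp_all

-- the two lists coincide
lemma pv_lists_eq (indexes : List Int) (max_len : Int) :
    ((PySem.List.pyRange 0 max_len 1).map
        (fun idx => if indexes.contains idx then pvAnn idx else ".."))
    = indexes.foldl (pvStep max_len) (List.replicate max_len.toNat "..") := by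
  apply List.ext_getElem?
  intro i
  by_cases hlen : i < max_len.toNat
  · have hm : (i : Int) < max_len := by omega
    have hr : i < (PySem.List.pyRange 0 max_len 1).length := by
      simpa [PySem.List.length_pyRange_one] using hlen
    rw [pvFold_getElem? max_len indexes _ i (by simpa using hlen) hm]
    rw [List.getElem?_map, List.getElem?_eq_getElem hr]
    have hidx : (PySem.List.pyRange 0 max_len 1)[i]'hr = (i : Int) := by
      rw [PySem.List.getElem_pyRange_one]; simp
    rw [hidx]
    by_cases hmem : (i : Int) ∈ indexes
    · simp [hmem]
    · simp [hmem, List.getElem_replicate]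
  · rw [List.getElem?_eq_none, List.getElem?_eq_none]
    · rw [pvFold_length]; simpa using hlen
    · simpa [PySem.List.length_pyRange_one] using hlen

-- ===== VERDICT (by name: the statement is the Claim_ definition above) =====
theorem create_diff_indexes_list_py_spec : Claim_equal_create_diff_indexes_list_py := by
  intro indexes max_len _
  unfold Spec_create_diff_indexes_list_py create_diff_indexes_list_py create_diff_indexes_list_py_alt
  have hA := pvA_list indexes max_len
  have hB := pv_lists_eq indexes max_len
  simp only []
  rw [show (fun acc idx =>
      if 0 ≤ idx ∧ idx < max_len then
        acc.set idx.toNat (if idx < 10 then "^" ++ PySem.Int.toStr idx else PySem.Int.toStr idx)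
      else acc) = pvStep max_len from by funext acc idx; simp [pvStep, pvAnn]]
  rw [hA, hB]
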